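-- pv_equiv track=rewrite | github.com/uchenna-j-edeh/dailly_problems | ik_patterns/arrays/k_unique_sub_str.py | unique_sub_str
-- ===== SOURCE A (Python) =====
-- def is_unique_sub_str(sub_str):
--     mydict = {}
--     for j in sub_str:#"havef
--         if mydict.get(j, False):
--             return False
--         mydict[j] = 1
--     return True
--
-- def unique_sub_str(s, k): # "havefunonleetcode"
--     count = 0
--     for i in range(k, len(s)+1): # "havef # last index would be 16, but to get the last char we need s[12:17]
--         window = s[i-k:i] # "havef, avefu
--         status = is_unique_sub_str(window)
--         if status: # true, true
--             count += 1 # 2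
--
--     return count
-- ===== SOURCE B (Python) =====
-- def unique_sub_str(s, k):
--     # Sliding window: one pass, track previous occurrence of each char and the
--     # earliest start of a duplicate-free window ending at the current index.
--     count = 0
--     start = 0
--     last = {}
--     for j, c in enumerate(s):
--         p = last.get(c, -1)
--         if p + 1 > start:
--             start = p + 1
--         last[c] = j
--         if j + 1 - start >= k:
--             count += 1
--     return count
-- ===== Notes on version B (the rewrite author's own statement) =====
-- stated objective: faster
-- what changed: Replaces A's O(n*k) re-scan of every length-k window (rebuilding a dict per window) with a single O(n) sliding-window pass that tracks each character's last occurrence and the earliest start of a duplicate-free window.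
-- outside the precondition, e.g. on unique_sub_str('ab', 0): A returns 3, B returns 2; on unique_sub_str('ab', -2): A returns 5, B returns 2
import Mathlib
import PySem

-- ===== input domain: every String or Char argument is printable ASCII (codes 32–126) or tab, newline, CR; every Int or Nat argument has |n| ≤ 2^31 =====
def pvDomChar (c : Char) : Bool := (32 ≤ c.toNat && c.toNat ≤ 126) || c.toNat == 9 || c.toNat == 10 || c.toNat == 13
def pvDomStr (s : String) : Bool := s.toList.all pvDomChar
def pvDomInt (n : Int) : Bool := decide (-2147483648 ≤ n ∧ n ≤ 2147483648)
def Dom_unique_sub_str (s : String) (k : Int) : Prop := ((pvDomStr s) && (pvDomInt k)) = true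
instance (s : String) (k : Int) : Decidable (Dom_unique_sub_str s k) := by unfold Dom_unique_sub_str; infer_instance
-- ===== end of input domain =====

-- B replaces A's per-window re-scan by a single sliding-window pass (alternative algorithm);
-- equivalence is proved for window lengths k ≥ 1 (Pre_).


-- ===== PORT A =====
-- helper is_unique_sub_str: the for-loop over the characters with its dict becomes isUniqueGo.
-- `mydict.get(j, False)` is truthy iff the key is present (the only stored value is 1 ≠ 0).
def isUniqueGo (d : PySem.Dict Char Int) : List Char → Bool
  | [] => true
  | c :: rest =>
    if PySem.Dict.getD d c 0 ≠ 0 then false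
    else isUniqueGo (PySem.Dict.insert d c 1) rest

def is_unique_sub_str (sub : List Char) : Bool := isUniqueGo PySem.Dict.empty sub

def unique_sub_str (s : String) (k : Int) : Int :=
  (PySem.List.pyRange k ((s.toList.length : Int) + 1)).foldl
    (fun count i =>
      let window := PySem.List.slice s.toList (some (i - k)) (some i)
      let status := is_unique_sub_str window
      if status then count + 1 else count) 0

-- ===== PORT B =====
-- the loop body of Source B's single pass; state = (count, start, last)
def bStep (k : Int) (st : Int × Int × PySem.Dict Char Int) (jc : Int × Char) :
    Int × Int × PySem.Dict Char Int :=
  let p := PySem.Dict.getD st.2.2 jc.2 (-1)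
  let start := if p + 1 > st.2.1 then p + 1 else st.2.1
  let last := PySem.Dict.insert st.2.2 jc.2 jc.1
  let count := if jc.1 + 1 - start ≥ k then st.1 + 1 else st.1
  (count, start, last)

def unique_sub_str_alt (s : String) (k : Int) : Int :=
  ((PySem.List.enumerate s.toList 0).foldl (bStep k) (0, 0, PySem.Dict.empty)).1

-- ===== PRECONDITION & SPEC =====
-- Pre_ restricts to the natural domain (window length at least 1): for k ≤ 0 A still returns
-- len(s)+1-k, counting the empty windows produced by range(k, len(s)+1) — an artefact of the
-- range arithmetic that no caller would specify — while B's single pass returns len(s) there.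
def Pre_unique_sub_str (s : String) (k : Int) : Prop := 1 ≤ k
instance (s : String) (k : Int) : Decidable (Pre_unique_sub_str s k) := by
  unfold Pre_unique_sub_str; infer_instance

def pvWitness_unique_sub_str : String × Int := ("abcabc", 3)

def Spec_unique_sub_str (s : String) (k : Int) (out : Int) : Prop := out = unique_sub_str_alt s k
instance (s : String) (k : Int) (out : Int) : Decidable (Spec_unique_sub_str s k out) := by
  unfold Spec_unique_sub_str; infer_instance

-- ===== CLAIM (what is proved, stated in full; the proofs are below) =====
def Claim_equal_unique_sub_str : Prop := ∀ (s : String) (k : Int), Dom_unique_sub_str s k →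
  Pre_unique_sub_str s k → Spec_unique_sub_str s k (unique_sub_str s k)

-- ===== LEMMAS AND PROOFS =====

-- A's helper decides Nodup: dict invariant carried as "every lookup of a remaining char is 0"
theorem isUniqueGo_iff (rest : List Char) (d : PySem.Dict Char Int) :
    isUniqueGo d rest = true ↔ rest.Nodup ∧ ∀ c ∈ rest, PySem.Dict.getD d c 0 = 0 := by
  induction rest generalizing d with
  | nil => simp [isUniqueGo]
  | cons c rest ih =>
    by_cases h : PySem.Dict.getD d c 0 = 0
    · rw [show isUniqueGo d (c :: rest) = isUniqueGo (d.insert c 1) rest from by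
        simp [isUniqueGo, h]]
      rw [ih, List.nodup_cons]
      constructor
      · rintro ⟨hnd, hall⟩
        refine ⟨⟨?_, hnd⟩, ?_⟩
        · intro hmem
          have h1 := hall c hmem
          rw [PySem.Dict.getD_insert] at h1
          simp at h1
        · intro c' hc'
          cases hc' with
          | head => exact h
          | tail _ hc' =>
            have h1 := hall c' hc'
            rw [PySem.Dict.getD_insert] at h1
            by_cases hcc : c' = c
            · simp [hcc] at h1
            · simpa [hcc] using h1
      · rintro ⟨⟨hcn, hnd⟩, hall⟩
        refine ⟨hnd, ?_⟩
        intro c' hc'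
        rw [PySem.Dict.getD_insert]
        have hne : c' ≠ c := by rintro rfl; exact hcn hc'
        simp only [hne, if_false]
        exact hall c' (.tail _ hc')
    · rw [show isUniqueGo d (c :: rest) = false from by simp [isUniqueGo, h]]
      simp only [Bool.false_eq_true, false_iff, not_and]
      intro _ hall
      exact h (hall c (.head _))

theorem is_unique_iff (sub : List Char) : is_unique_sub_str sub = true ↔ sub.Nodup := by
  simp [is_unique_sub_str, isUniqueGo_iff, PySem.Dict.getD_empty]

-- B's state after processing the first j characters
def bSt (l : List Char) (k : Int) (j : Nat) : Int × Int × PySem.Dict Char Int :=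
  (PySem.List.enumerate (l.take j) 0).foldl (bStep k) (0, 0, PySem.Dict.empty)

theorem bSt_succ (l : List Char) (k : Int) (j : Nat) (h : j < l.length) :
    bSt l k (j + 1) = bStep k (bSt l k j) ((j : Int), l[j]) := by
  unfold bSt
  rw [List.take_add_one, List.getElem?_eq_getElem h]
  rw [PySem.List.enumerate_append, List.foldl_append]
  simp only [Option.toList_some, PySem.List.enumerate_cons, PySem.List.enumerate_nil]
  simp [List.length_take, Nat.min_eq_left h.le]

-- the A-side count of valid windows among those ending within the first j characters
def aCnt (l : List Char) (k : Int) (j : Nat) : Int :=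
  ((PySem.List.pyRange k ((j : Int) + 1)).countP
    (fun i => is_unique_sub_str (PySem.List.slice l (some (i - k)) (some i))) : Int)

-- the sliding-window invariant: after j characters, `start` is the least left end of a
-- duplicate-free window reaching the current position, `last` maps each char to its last index,
-- and `count` already equals A's count over the windows ending within the prefix
theorem bSt_inv (l : List Char) (k : Int) (hk : 1 ≤ k) :
    ∀ j : Nat, j ≤ l.length →
      (0 ≤ (bSt l k j).2.1) ∧
      (∀ c, -1 ≤ (bSt l k j).2.2.getD c (-1)) ∧
      (∀ c (i : Nat), ((bSt l k j).2.2.getD c (-1) < (i : Int) ↔ c ∉ (l.take j).drop i)) ∧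
      (∀ i : Nat, ((bSt l k j).2.1 ≤ (i : Int) ↔ ((l.take j).drop i).Nodup)) ∧
      (bSt l k j).1 = aCnt l k j := by
  intro j
  induction j with
  | zero =>
    intro _
    have hb : bSt l k 0 = (0, 0, PySem.Dict.empty) := by
      simp [bSt, PySem.List.enumerate_nil]
    have ha : aCnt l k 0 = 0 := by
      unfold aCnt
      rw [show (((0 : Nat) : Int) + 1) = 1 by norm_num,
        PySem.List.pyRange_one_eq_nil hk]
      simp
    rw [hb, ha]
    refine ⟨le_refl 0, ?_, ?_, ?_, rfl⟩
    · intro c; rw [PySem.Dict.getD_empty]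
    · intro c i; rw [PySem.Dict.getD_empty]; simp; omega
    · intro i; simp
  | succ j ih =>
    intro hj1
    have hj : j < l.length := hj1
    obtain ⟨H0, H1, H2, H3, H4⟩ := ih hj.le
    rw [bSt_succ l k j hj]
    set st := bSt l k j with hst
    have hbs : bStep k st ((j : Int), l[j]) =
        (if (j : Int) + 1 - (if st.2.2.getD l[j] (-1) + 1 > st.2.1
            then st.2.2.getD l[j] (-1) + 1 else st.2.1) ≥ k
          then st.1 + 1 else st.1,
         (if st.2.2.getD l[j] (-1) + 1 > st.2.1
            then st.2.2.getD l[j] (-1) + 1 else st.2.1),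
         st.2.2.insert l[j] (j : Int)) := rfl
    rw [hbs]
    set p := st.2.2.getD l[j] (-1) with hpdef
    have hdropj : (l.take j).drop j = ([] : List Char) := by
      simp
    have hp_lt : p < (j : Int) := (H2 l[j] j).mpr (by rw [hdropj]; exact List.not_mem_nil)
    have hp_ge := H1 l[j]
    have hstart_le : st.2.1 ≤ (j : Int) := (H3 j).mpr (by rw [hdropj]; exact List.nodup_nil)
    have htake : l.take (j + 1) = l.take j ++ [l[j]] := by
      rw [List.take_add_one, List.getElem?_eq_getElem hj]; rfl
    have hlen_take : (l.take j).length = j := by simp [hj.le]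
    have hG0 : 0 ≤ (if p + 1 > st.2.1 then p + 1 else st.2.1) := by split_ifs <;> omega
    have hdropble : ∀ i : Nat, i ≤ j →
        (l.take (j + 1)).drop i = (l.take j).drop i ++ [l[j]] := by
      intro i hij
      rw [htake, List.drop_append_of_le_length (by rw [hlen_take]; exact hij)]
    have hdropnil : ∀ i : Nat, j + 1 ≤ i → (l.take (j + 1)).drop i = [] := by
      intro i hij
      apply List.drop_eq_nil_of_le
      rw [htake]; simp; omega
    have hG3 : ∀ i : Nat, ((if p + 1 > st.2.1 then p + 1 else st.2.1) ≤ (i : Int) ↔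
        ((l.take (j + 1)).drop i).Nodup) := by
      intro i
      by_cases hij : i ≤ j
      · rw [hdropble i hij]
        have hnd : ((l.take j).drop i ++ [l[j]]).Nodup ↔
            ((l.take j).drop i).Nodup ∧ l[j] ∉ (l.take j).drop i := by
          simp only [List.nodup_append, List.nodup_singleton, true_and,
            and_congr_right_iff]
          intro _
          constructor
          · intro h hm
            exact (h _ hm _ (List.mem_singleton_self _)) rfl
          · intro h a ha b hb
            rw [List.mem_singleton] at hb
            subst hb
            exact fun he => h (he ▸ ha)
        rw [hnd, ← H3 i, ← H2 l[j] i, ← hpdef]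
        split_ifs <;> omega
      · rw [hdropnil i (by omega)]
        simp only [List.nodup_nil, iff_true]
        have hij' : j + 1 ≤ i := Nat.succ_le_of_lt (Nat.lt_of_not_le hij)
        have hij'' : ((j : Int)) + 1 ≤ (i : Int) := by exact_mod_cast hij'
        by_cases hcase : p + 1 > st.2.1
        · rw [if_pos hcase]; omega
        · rw [if_neg hcase]; omega
    refine ⟨hG0, ?_, ?_, hG3, ?_⟩
    · intro c
      rw [PySem.Dict.getD_insert]
      split_ifs
      · omega
      · exact H1 c
    · intro c i
      rw [PySem.Dict.getD_insert]
      by_cases hij : i ≤ j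
      · rw [hdropble i hij]
        by_cases hc : c = l[j]
        · rw [if_pos hc]
          apply iff_of_false
          · omega
          · simp [hc]
        · rw [if_neg hc]
          simp only [List.mem_append, List.mem_singleton, hc, or_false]
          exact H2 c i
      · rw [hdropnil i (by omega)]
        simp only [List.not_mem_nil, not_false_eq_true, iff_true]
        by_cases hc : c = l[j]
        · rw [if_pos hc]; omega
        · rw [if_neg hc]
          have := (H2 c j).mpr (by rw [hdropj]; exact List.not_mem_nil)
          omega
    · -- the count component
      by_cases hkj : k ≤ (j : Int) + 1
      · have hsplit : PySem.List.pyRange k (((j + 1 : Nat) : Int) + 1) =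
            PySem.List.pyRange k ((j : Int) + 1) ++ [(j : Int) + 1] := by
          push_cast
          exact PySem.List.pyRange_one_succ_right hkj
        have hi0 : (((((j : Int) + 1 - k).toNat) : Int)) = (j : Int) + 1 - k := by omega
        set i0 : Nat := ((j : Int) + 1 - k).toNat with hi0def
        have hslice : PySem.List.slice l (some ((j : Int) + 1 - k)) (some ((j : Int) + 1)) =
            (l.take (j + 1)).drop i0 := by
          rw [PySem.List.slice_toNat l (by omega) (by omega), List.drop_take,
            show ((j : Int) + 1).toNat = j + 1 from by omega]
        have hcond : ((j : Int) + 1 - (if p + 1 > st.2.1 then p + 1 else st.2.1) ≥ k) ↔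
            is_unique_sub_str (PySem.List.slice l (some (((j : Int) + 1) - k))
              (some ((j : Int) + 1))) = true := by
          rw [hslice, is_unique_iff, ← hG3 i0, hi0]
          constructor <;> intro <;> omega
        unfold aCnt
        rw [hsplit, List.countP_append, H4]
        unfold aCnt
        by_cases hu : is_unique_sub_str (PySem.List.slice l (some (((j : Int) + 1) - k))
            (some ((j : Int) + 1))) = true
        · rw [if_pos (hcond.mpr hu)]
          have hone : List.countP
              (fun i => is_unique_sub_str (PySem.List.slice l (some (i - k)) (some i)))
              [(j : Int) + 1] = 1 := by
            simp [hu]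
          rw [hone]
          push_cast
          omega
        · rw [if_neg (fun h => hu (hcond.mp h))]
          have hone : List.countP
              (fun i => is_unique_sub_str (PySem.List.slice l (some (i - k)) (some i)))
              [(j : Int) + 1] = 0 := by
            simp [hu]
          rw [hone]
          push_cast
          omega
      · have he1 : PySem.List.pyRange k (((j + 1 : Nat) : Int) + 1) = [] :=
          PySem.List.pyRange_one_eq_nil (by push_cast; omega)
        have he0 : PySem.List.pyRange k ((j : Int) + 1) = [] :=
          PySem.List.pyRange_one_eq_nil (by omega)
        have hz : st.1 = 0 := by rw [H4]; unfold aCnt; rw [he0]; simp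
        have hp_ge' : -1 ≤ p := by rw [hpdef]; exact H1 l[j]
        have hcond0 : ¬ ((j : Int) + 1 - (if p + 1 > st.2.1 then p + 1 else st.2.1) ≥ k) := by
          by_cases hcase : p + 1 > st.2.1
          · rw [if_pos hcase]; omega
          · rw [if_neg hcase]; omega
        rw [if_neg hcond0, hz]
        unfold aCnt
        rw [he1]
        simp

theorem unique_sub_str_eq_aCnt (s : String) (k : Int) :
    unique_sub_str s k = aCnt s.toList k s.toList.length := by
  unfold unique_sub_str aCnt
  rw [PySem.List.foldl_count_if]
  simp

-- ===== VERDICT (by name: the statement is the Claim_ definition above) =====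
theorem unique_sub_str_spec : Claim_equal_unique_sub_str := by
  intro s k _ hk
  unfold Spec_unique_sub_str
  have h := (bSt_inv s.toList k hk s.toList.length le_rfl).2.2.2.2
  rw [unique_sub_str_eq_aCnt, ← h]
  unfold unique_sub_str_alt bSt
  rw [List.take_length]
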